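-- pv_equiv track=rewrite | github.com/magajisuleiman/alx-higher_level_programming | 0x03-python-data_structures/8-multiple_returns.py | multiple_returns
-- ===== SOURCE A (Python) =====
-- def multiple_returns(sentence):
--     counter = 0
--     for i in sentence:
--         counter += 1
--         if sentence == "":
--             sentence = None
--         else:
--             sentence = sentence[0]
--
--     return (counter, sentence)
-- ===== SOURCE B (Python) =====
-- def multiple_returns(sentence):
--     # closed form: length plus first character (the original object when empty)
--     return (len(sentence), sentence if sentence == "" else sentence[0])
-- ===== Notes on version B (the rewrite author's own statement) =====
-- stated objective: simpler
-- what changed: Replaced the counting loop with repeated first-character reassignment by a closed form: len(sentence) and a single guarded sentence[0].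
import Mathlib
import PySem

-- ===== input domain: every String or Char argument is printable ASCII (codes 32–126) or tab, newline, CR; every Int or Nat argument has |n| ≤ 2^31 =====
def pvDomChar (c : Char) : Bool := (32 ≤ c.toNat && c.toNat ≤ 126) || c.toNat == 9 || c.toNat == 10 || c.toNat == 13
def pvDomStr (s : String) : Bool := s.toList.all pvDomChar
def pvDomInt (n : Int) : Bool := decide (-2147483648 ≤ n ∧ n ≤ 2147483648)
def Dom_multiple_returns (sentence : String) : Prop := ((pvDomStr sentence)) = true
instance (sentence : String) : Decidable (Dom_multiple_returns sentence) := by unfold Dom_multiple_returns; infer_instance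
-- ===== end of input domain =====

-- B replaces A's counting loop (which also rewrites `sentence` to its first character on
-- every iteration) by a closed form: the length and one guarded first-character read.

-- ===== PORT A =====
-- State is (counter, Option String): `none` models Python's None (A's dead `sentence == ""`
-- branch inside the loop; it can never fire, since the loop body only runs when the current
-- `sentence` is a nonempty string).  The final `.getD ""` discharges the unreachable `none`.
def multiple_returns (sentence : String) : Int × String :=
  let st := sentence.toList.foldl
    (fun (st : Int × Option String) _ =>
      match st with
      | (c, some s) =>
          (c + 1,
           if s = "" then none
           else (PySem.Str.pyGet? s 0).map (fun ch => String.ofList [ch]))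
      | (c, none) => (c + 1, none))   -- unreachable (Python would raise TypeError here)
    ((0 : Int), some sentence)
  (st.1, st.2.getD "")

-- ===== PORT B =====
def multiple_returns_alt (sentence : String) : Int × String :=
  ((PySem.Str.len sentence : Int),
   if sentence = "" then sentence
   else match PySem.Str.pyGet? sentence 0 with
        | some ch => String.ofList [ch]
        | none => "")   -- unreachable: sentence is nonempty here

-- ===== PRECONDITION & SPEC =====
def Spec_multiple_returns (sentence : String) (out : Int × String) : Prop := out = multiple_returns_alt sentence
instance (sentence : String) (out : Int × String) : Decidable (Spec_multiple_returns sentence out) := by unfold Spec_multiple_returns; infer_instance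

-- ===== CLAIM (what is proved, stated in full; the proofs are below) =====
def Claim_equal_multiple_returns : Prop := ∀ (sentence : String), Dom_multiple_returns sentence → Spec_multiple_returns sentence (multiple_returns sentence)

-- ===== LEMMAS AND PROOFS =====

-- Once `sentence` has been replaced by its (one-character) first character, the loop state
-- is a fixed point apart from the counter.
theorem pv_fold_fixed (c : Char) (l : List Char) (k : Int) :
    l.foldl
      (fun (st : Int × Option String) _ =>
        match st with
        | (c', some s) =>
            (c' + 1,
             if s = "" then none
             else (PySem.Str.pyGet? s 0).map (fun ch => String.ofList [ch]))
        | (c', none) => (c' + 1, none))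
      (k, some (String.ofList [c]))
    = (k + l.length, some (String.ofList [c])) := by
  induction l generalizing k with
  | nil => simp
  | cons x xs ih =>
      have h1 : (String.ofList [c]) ≠ "" := by
        intro h
        have h' : ([c] : List Char) = [] := by simpa using congrArg String.toList h
        simp at h'
      simp only [List.foldl_cons]
      rw [if_neg h1]
      have h2 : PySem.Str.pyGet? (String.ofList [c]) 0 = some c := by
        simp [PySem.Str.pyGet?, PySem.Chars.pyGet?, PySem.List.pyGet?, PySem.List.pyIdx?]
      rw [h2]
      simp only [Option.map_some]
      rw [ih]
      simp
      ring

-- ===== VERDICT (by name: the statement is the Claim_ definition above) =====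
theorem multiple_returns_spec : Claim_equal_multiple_returns := by
  intro sentence _
  unfold Spec_multiple_returns multiple_returns multiple_returns_alt
  by_cases hs : sentence = ""
  · subst hs; decide
  · have hl : sentence.toList ≠ [] := by
      intro h
      exact hs (by
        have := congrArg String.ofList h
        simpa using this)
    obtain ⟨ch, rest, hrest⟩ : ∃ ch rest, sentence.toList = ch :: rest :=
      List.exists_cons_of_ne_nil hl
    have hget : PySem.Str.pyGet? sentence 0 = some ch := by
      simp [PySem.Str.pyGet?, PySem.Chars.pyGet?, PySem.List.pyGet?, PySem.List.pyIdx?, hrest]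
    rw [hrest]
    simp only [List.foldl_cons, if_neg hs, hget, Option.map_some]
    rw [pv_fold_fixed]
    simp [hrest]
    ring
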